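-- pv_equiv track=rewrite | github.com/r-vvch/LeetCode | solutions/424_longest_repeating_character_replacement.py | summCountWihoutTheMostCommon
-- ===== SOURCE A (Python) =====
-- def summCountWihoutTheMostCommon(ch_dict: dict) -> int:
--     max_count = 0
--     summ = 0
--     for i in ch_dict:
--         summ += ch_dict[i]
--         if ch_dict[i] > max_count:
--             max_count = ch_dict[i]
--     summ -= max_count
--     return summ
-- ===== SOURCE B (Python) =====
-- def summCountWihoutTheMostCommon(ch_dict: dict) -> int:
--     vals = sorted(ch_dict.values())
--     if vals and vals[-1] > 0:
--         return sum(vals[:-1])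
--     return sum(vals)
-- ===== Notes on version B (the rewrite author's own statement) =====
-- stated objective: alternative
-- what changed: Replaces A's fused running-max/sum loop with a sort-based algorithm: sort the values, drop the last (largest) element iff it is positive, and sum the remainder; correct because the largest sorted value is exactly the peak A subtracts when positive.
import Mathlib
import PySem

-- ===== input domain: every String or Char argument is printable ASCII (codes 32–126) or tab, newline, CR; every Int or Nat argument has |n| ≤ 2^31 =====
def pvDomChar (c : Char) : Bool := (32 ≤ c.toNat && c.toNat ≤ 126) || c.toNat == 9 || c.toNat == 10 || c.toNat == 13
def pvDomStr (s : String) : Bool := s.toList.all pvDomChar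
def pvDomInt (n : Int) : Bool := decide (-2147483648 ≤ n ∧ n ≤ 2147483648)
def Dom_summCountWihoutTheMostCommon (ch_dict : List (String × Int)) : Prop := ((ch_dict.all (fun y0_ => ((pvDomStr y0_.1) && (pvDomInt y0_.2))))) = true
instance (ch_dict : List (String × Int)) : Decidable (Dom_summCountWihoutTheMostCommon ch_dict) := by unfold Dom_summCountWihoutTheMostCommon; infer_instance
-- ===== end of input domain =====

-- B replaces A's fused running-max/sum loop by a sort-based algorithm: sort the values, drop the last (largest) iff positive, sum the rest (alternative, O(n log n)).


-- ===== PORT A =====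
-- The assoc list stands for a Python dict: PySem.Dict.ofList applies Python's duplicate-key overwrite, then A loops over the keys.
def summCountWihoutTheMostCommon (ch_dict : List (String × Int)) : Int :=
  let d := PySem.Dict.ofList ch_dict
  let st := d.keys.foldl
    (fun (st : Int × Int) i =>
      let summ := st.2 + d.getD i 0
      let mc := if d.getD i 0 > st.1 then d.getD i 0 else st.1
      (mc, summ)) (0, 0)
  st.2 - st.1

-- ===== PORT B =====
-- vals = sorted(values); if vals and vals[-1] > 0: sum(vals[:-1]) else sum(vals)
def summCountWihoutTheMostCommon_alt (ch_dict : List (String × Int)) : Int :=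
  let vals := PySem.List.sorted (PySem.Dict.ofList ch_dict).values (fun x => x) false
  if vals ≠ [] ∧ PySem.List.pyGetD vals (-1) 0 > 0 then
    (PySem.List.slice vals none (some (-1))).sum
  else vals.sum

-- ===== PRECONDITION & SPEC =====
def Spec_summCountWihoutTheMostCommon (ch_dict : List (String × Int)) (out : Int) : Prop := out = summCountWihoutTheMostCommon_alt ch_dict
instance (ch_dict : List (String × Int)) (out : Int) : Decidable (Spec_summCountWihoutTheMostCommon ch_dict out) := by unfold Spec_summCountWihoutTheMostCommon; infer_instance

-- ===== CLAIM (what is proved, stated in full; the proofs are below) =====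
def Claim_equal_summCountWihoutTheMostCommon : Prop := ∀ (ch_dict : List (String × Int)), Dom_summCountWihoutTheMostCommon ch_dict → Spec_summCountWihoutTheMostCommon ch_dict (summCountWihoutTheMostCommon ch_dict)

-- ===== LEMMAS AND PROOFS =====

theorem pv_step_eq_max (a v : Int) : (if a < v then v else a) = max a v := by
  rw [max_def]; split_ifs <;> omega

-- A's fused loop splits into a running-max fold and the list sum.
theorem pv_fold_split (vs : List Int) (mc s : Int) :
    vs.foldl (fun (st : Int × Int) v => (if st.1 < v then v else st.1, st.2 + v)) (mc, s)
      = (vs.foldl max mc, s + vs.sum) := by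
  induction vs generalizing mc s with
  | nil => simp
  | cons v vs ih =>
    simp only [List.foldl_cons, List.sum_cons]
    rw [ih, pv_step_eq_max, add_assoc]

theorem pv_foldl_max_of_le (t : List Int) (b : Int) (h : ∀ x ∈ t, x ≤ b) :
    t.foldl max b = b := by
  induction t with
  | nil => rfl
  | cons x t ih =>
    have hx : x ≤ b := h x (by simp)
    simp only [List.foldl_cons, max_eq_left hx]
    exact ih (fun y hy => h y (by simp [hy]))

theorem pv_foldl_max_eq (t : List Int) : ∀ (a m : Int), m ∈ t → (∀ x ∈ t, x ≤ m) →
    t.foldl max a = max a m := by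
  induction t with
  | nil => intro a m hm _; cases hm
  | cons x t ih =>
    intro a m hm hb
    have hx : x ≤ m := hb x (by simp)
    rcases List.mem_cons.mp hm with hxm | hmt
    · simp only [List.foldl_cons]
      rw [← hxm]
      exact pv_foldl_max_of_le t (max a m) (fun y hy => le_trans (hb y (by simp [hy])) (le_max_right a m))
    · simp only [List.foldl_cons]
      rw [ih (max a x) m hmt (fun y hy => hb y (by simp [hy]))]
      rw [max_assoc, max_eq_right hx]

-- ===== VERDICT (by name: the statement is the Claim_ definition above) =====
theorem summCountWihoutTheMostCommon_spec : Claim_equal_summCountWihoutTheMostCommon := by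
  intro ch_dict _
  unfold Spec_summCountWihoutTheMostCommon summCountWihoutTheMostCommon summCountWihoutTheMostCommon_alt
  set d := PySem.Dict.ofList ch_dict with hd
  set vs := d.values with hvs
  set s := PySem.List.sorted vs (fun x => x) false with hs
  have hperm : s.Perm vs := PySem.List.sorted_perm vs (fun x => x) false
  -- A's loop over the keys is a fold over the values
  have hvals := PySem.Dict.values_eq_map_keys d (PySem.Dict.nodup_keys_ofList ch_dict) 0
  have hfold : d.keys.foldl
      (fun (st : Int × Int) i =>
        (if st.1 < d.getD i 0 then d.getD i 0 else st.1, st.2 + d.getD i 0)) (0, 0)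
      = vs.foldl (fun (st : Int × Int) v => (if st.1 < v then v else st.1, st.2 + v)) (0, 0) := by
    rw [hvs, hvals, List.foldl_map]
  simp only [gt_iff_lt]
  rw [hfold, pv_fold_split]
  by_cases hnil : s = []
  · have hvsnil : vs = [] := by rw [hnil] at hperm; exact hperm.symm.eq_nil
    simp [hnil, hvsnil]
  · -- s = s.dropLast ++ [m], m is the maximum of vs
    have hm_mem_s : s.getLast hnil ∈ s := List.getLast_mem hnil
    set m := s.getLast hnil with hm
    have hsplit : s.dropLast ++ [m] = s := List.dropLast_append_getLast hnil
    have hpw : s.Pairwise (fun a b => a ≤ b) := PySem.List.sorted_pairwise vs (fun x => x)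
    have hub_s : ∀ x ∈ s, x ≤ m := by
      intro x hx
      rw [← hsplit] at hx hpw
      rcases List.mem_append.mp hx with hxd | hxm
      · exact (List.pairwise_append.mp hpw).2.2 x hxd m (by simp)
      · simp at hxm; omega
    have hm_mem : m ∈ vs := hperm.mem_iff.mp hm_mem_s
    have hub : ∀ x ∈ vs, x ≤ m := fun x hx => hub_s x (hperm.mem_iff.mpr hx)
    have hmax : vs.foldl max 0 = max 0 m := pv_foldl_max_eq vs 0 m hm_mem hub
    have hsum : s.sum = vs.sum := hperm.sum_eq
    have hlast : PySem.List.pyGetD s (-1) 0 = m := PySem.List.pyGetD_neg_one s 0 hnil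
    have hdls : (PySem.List.slice s none (some (-1))) = s.dropLast := PySem.List.slice_to_neg_one s
    have hdlsum : s.dropLast.sum + m = vs.sum := by
      rw [← hsum, ← hsplit]; simp
    rw [hmax, hlast, hdls]
    by_cases hpos : 0 < m
    · rw [if_pos ⟨hnil, hpos⟩, max_eq_right (le_of_lt hpos)]; omega
    · rw [if_neg (by intro h; exact hpos h.2), max_eq_left (le_of_not_gt hpos), hsum]; omega
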